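-- pv_equiv track=rewrite | github.com/JDerekLomas/quantuminspire | mcp-servers/qrng/qrng_server.py | _von_neumann_debias
-- ===== SOURCE A (Python) =====
-- def _von_neumann_debias(values: list[int], bits_per_value: int = 8) -> list[int]:
--     """Von Neumann debiasing on the bit level, then repack into integers.
--
--     Takes pairs of bits: 01→0, 10→1, 00/11→discard.
--     This eliminates first-order hardware bias (e.g., qubits favoring |0>).
--     NIST-certified: raw Tuna-9 passes 1/8 tests, debiased passes 8/8.
--     """
--     # Unpack all values to bits
--     bits = []
--     for v in values:
--         for i in range(bits_per_value - 1, -1, -1):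
--             bits.append((v >> i) & 1)
--
--     # Von Neumann extraction: take pairs, keep heterogeneous ones
--     debiased_bits = []
--     for i in range(0, len(bits) - 1, 2):
--         if bits[i] != bits[i + 1]:
--             debiased_bits.append(bits[i])
--
--     # Repack into integers
--     result = []
--     for i in range(0, len(debiased_bits) - bits_per_value + 1, bits_per_value):
--         val = 0
--         for j in range(bits_per_value):
--             val = (val << 1) | debiased_bits[i + j]
--         result.append(val)
--     return result
-- ===== SOURCE B (Python) =====
-- def _von_neumann_debias(values: list[int], bits_per_value: int = 8) -> list[int]:
--     """Streaming Von Neumann extractor: one pass over the bit stream with a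
--     one-bit latch, then repack the debiased bits into integers."""
--     pending = None
--     debiased_bits = []
--     for v in values:
--         for i in range(bits_per_value - 1, -1, -1):
--             b = (v >> i) & 1
--             if pending is None:
--                 pending = b
--             else:
--                 if pending != b:
--                     debiased_bits.append(pending)
--                 pending = None
--
--     result = []
--     for start in range(0, len(debiased_bits) - bits_per_value + 1, bits_per_value):
--         val = 0
--         for b in debiased_bits[start:start + bits_per_value]:
--             val = (val << 1) | b
--         result.append(val)
--     return result
-- ===== Notes on version B (the rewrite author's own statement) =====
-- stated objective: alternative
-- what changed: A unpacks all bits into a list and then pairs them by index in a second pass; B makes one streaming pass feeding each bit into a one-bit-latch state machine that emits debiased bits on the fly, and repacks by folding over slices instead of an inner index loop.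
import Mathlib
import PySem

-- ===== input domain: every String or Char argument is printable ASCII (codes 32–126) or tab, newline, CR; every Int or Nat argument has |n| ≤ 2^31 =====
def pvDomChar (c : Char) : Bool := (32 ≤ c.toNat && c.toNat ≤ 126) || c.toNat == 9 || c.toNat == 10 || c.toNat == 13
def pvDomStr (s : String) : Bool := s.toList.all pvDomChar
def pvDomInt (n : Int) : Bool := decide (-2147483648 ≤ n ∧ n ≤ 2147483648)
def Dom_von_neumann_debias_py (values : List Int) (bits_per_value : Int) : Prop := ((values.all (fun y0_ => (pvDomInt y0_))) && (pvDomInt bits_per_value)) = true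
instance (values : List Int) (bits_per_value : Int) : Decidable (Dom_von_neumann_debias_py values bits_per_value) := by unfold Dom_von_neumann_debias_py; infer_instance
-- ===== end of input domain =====

-- B replaces A's unpack-then-index-pairs passes by one streaming pass with a one-bit latch
-- (objective: alternative decomposition, same cost); the repack keeps the range loop but folds a slice.
-- Python lists are ported as Lean Arrays (Python lists are arrays: O(1) append and index).

-- xs[i] for an Int index that is ≥ 0 at every use site (exact there; both ports only index in range)
def aGet (a : Array Int) (i : Int) : Int := a.getD i.toNat 0
-- xs[i:j] for 0 ≤ i (exact there: Python clamps the stop bound exactly like Array.extract)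
def aSlice (a : Array Int) (i j : Int) : Array Int := a.extract i.toNat j.toNat

-- ===== PORT A =====
-- (v >> i) & 1 is ported as PySem.Int.band (v >>> i.toNat) 1 — exact: i ≥ 0 for every i the range yields.
def von_neumann_debias_py (values : List Int) (bits_per_value : Int) : List Int :=
  let bits : Array Int := values.foldl (fun bits v =>
    (PySem.List.pyRange (bits_per_value - 1) (-1) (-1)).foldl
      (fun bits i => bits.push (PySem.Int.band (v >>> i.toNat) 1)) bits) #[]
  let debiased_bits : Array Int := (PySem.List.pyRange 0 ((bits.size : Int) - 1) 2).foldl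
    (fun acc i =>
      if aGet bits i ≠ aGet bits (i + 1) then acc.push (aGet bits i) else acc) #[]
  ((PySem.List.pyRange 0 ((debiased_bits.size : Int) - bits_per_value + 1) bits_per_value).foldl
    (fun result i =>
      result.push ((PySem.List.pyRange 0 bits_per_value 1).foldl
        (fun val j => PySem.Int.bor (val <<< (1 : Nat)) (aGet debiased_bits (i + j))) 0)) #[]).toList

-- ===== PORT B =====
-- loop body of B's streaming pass: feed one bit into the (pending latch, output) state
def vnFeed (st : Option Int × Array Int) (b : Int) : Option Int × Array Int :=
  match st with
  | (none, acc) => (some b, acc)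
  | (some p, acc) => (none, if p ≠ b then acc.push p else acc)

def von_neumann_debias_py_alt (values : List Int) (bits_per_value : Int) : List Int :=
  let st : Option Int × Array Int := values.foldl (fun st v =>
    (PySem.List.pyRange (bits_per_value - 1) (-1) (-1)).foldl
      (fun st i => vnFeed st (PySem.Int.band (v >>> i.toNat) 1)) st) (none, #[])
  let debiased_bits := st.2
  ((PySem.List.pyRange 0 ((debiased_bits.size : Int) - bits_per_value + 1) bits_per_value).foldl
    (fun result start =>
      result.push ((aSlice debiased_bits start (start + bits_per_value)).foldl
        (fun val b => PySem.Int.bor (val <<< (1 : Nat)) b) 0)) #[]).toList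

-- ===== PRECONDITION & SPEC =====
-- Pre_ excludes only bits_per_value = 0, where Python A raises ValueError (range step 0) — B raises there too.
def Pre_von_neumann_debias_py (values : List Int) (bits_per_value : Int) : Prop := bits_per_value ≠ 0
instance (values : List Int) (bits_per_value : Int) : Decidable (Pre_von_neumann_debias_py values bits_per_value) := by unfold Pre_von_neumann_debias_py; infer_instance
def pvWitness_von_neumann_debias_py : List Int × Int := ([2, 1], 2)

def Spec_von_neumann_debias_py (values : List Int) (bits_per_value : Int) (out : List Int) : Prop := out = von_neumann_debias_py_alt values bits_per_value
instance (values : List Int) (bits_per_value : Int) (out : List Int) : Decidable (Spec_von_neumann_debias_py values bits_per_value out) := by unfold Spec_von_neumann_debias_py; infer_instance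

-- ===== CLAIM (what is proved, stated in full; the proofs are below) =====
def Claim_equal_von_neumann_debias_py : Prop := ∀ (values : List Int) (bits_per_value : Int), Dom_von_neumann_debias_py values bits_per_value → Pre_von_neumann_debias_py values bits_per_value → Spec_von_neumann_debias_py values bits_per_value (von_neumann_debias_py values bits_per_value)

-- ===== LEMMAS AND PROOFS =====

-- the Von Neumann extraction of a flat bit list, pair by pair
def pairUp : List Int → List Int
  | a :: b :: rest => (if a ≠ b then [a] else []) ++ pairUp rest
  | _ => []

-- list-level mirror of vnFeed, used only in the proofs
def vnFeedL (st : Option Int × List Int) (b : Int) : Option Int × List Int :=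
  match st with
  | (none, acc) => (some b, acc)
  | (some p, acc) => (none, if p ≠ b then acc ++ [p] else acc)

-- a fold commutes with an abstraction of its state, pointwise on the list's members
lemma foldl_abs {σ τ α : Type} (φ : σ → τ) :
    ∀ (l : List α) (f : σ → α → σ) (g : τ → α → τ),
    (∀ s x, x ∈ l → φ (f s x) = g (φ s) x) → ∀ s, φ (l.foldl f s) = l.foldl g (φ s) := by
  intro l
  induction l with
  | nil => intros; rfl
  | cons x xs ih =>
    intro f g h s
    rw [List.foldl_cons, List.foldl_cons, ih f g (fun s y hy => h s y (List.mem_cons_of_mem _ hy)),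
      h s x List.mem_cons_self]

lemma arr_getD (a : Array Int) (n : Nat) (d : Int) : a.getD n d = a.toList.getD n d := by
  by_cases h : n < a.size
  · simp [Array.getD, h, List.getD_eq_getElem?_getD]
  · simp [Array.getD, h, List.getD_eq_getElem?_getD]

lemma aGet_toList (a : Array Int) (i : Int) (h0 : 0 ≤ i) :
    aGet a i = PySem.List.pyGetD a.toList i 0 := by
  obtain ⟨n, rfl⟩ : ∃ n : Nat, i = (n : Int) := ⟨i.toNat, (Int.toNat_of_nonneg h0).symm⟩
  rw [PySem.List.pyGetD_natCast]
  unfold aGet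
  simp only [Int.toNat_natCast]
  exact arr_getD a n 0

lemma pyRange_pos_nil (a b s : Int) (hs : 0 < s) (h : b ≤ a) :
    PySem.List.pyRange a b s = [] := by
  rw [PySem.List.pyRange_of_pos _ _ hs, if_neg (not_lt.2 h)]
  simp

lemma pyRange_neg_nil (a b s : Int) (hs : s < 0) (h : a ≤ b) :
    PySem.List.pyRange a b s = [] := by
  unfold PySem.List.pyRange
  rw [if_neg (by omega : ¬ s = 0)]
  simp only [if_neg (not_lt.2 (le_of_lt hs)), if_neg (not_lt.2 h)]
  simp

lemma pyRange_pos_cons (a b s : Int) (hs : 0 < s) (h : a < b) :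
    PySem.List.pyRange a b s = a :: PySem.List.pyRange (a + s) b s := by
  rw [PySem.List.pyRange_of_pos _ _ hs, PySem.List.pyRange_of_pos _ _ hs, if_pos h]
  have hc : ((b - a + s - 1) / s).toNat
      = (if a + s < b then ((b - (a + s) + s - 1) / s).toNat else 0) + 1 := by
    split_ifs with h2
    · have he : b - a + s - 1 = (b - (a + s) + s - 1) + 1 * s := by ring
      rw [he, Int.add_mul_ediv_right _ _ (by omega : s ≠ 0)]
      have h1 : 0 ≤ (b - (a + s) + s - 1) / s := Int.ediv_nonneg (by omega) (by omega)
      omega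
    · have he : b - a + s - 1 = (b - a - 1) + 1 * s := by ring
      rw [he, Int.add_mul_ediv_right _ _ (by omega : s ≠ 0)]
      rw [Int.ediv_eq_zero_of_lt (by omega) (by omega)]
      rfl
  rw [hc, List.range_succ_eq_map]
  simp only [List.map_cons, List.map_map]
  congr 1
  · push_cast; ring
  · apply List.map_congr_left
    intro k _
    simp only [Function.comp]
    push_cast; ring

-- A's index-pair loop computes pairUp of the suffix it has not yet consumed
lemma pairs_loop (bits : List Int) (l : List Int) :
    ∀ (n : Nat) (acc : List Int), bits.drop (2 * n) = l →
    (PySem.List.pyRange (2 * (n : Int)) ((bits.length : Int) - 1) 2).foldl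
      (fun acc i =>
        if PySem.List.pyGetD bits i 0 ≠ PySem.List.pyGetD bits (i + 1) 0
        then acc ++ [PySem.List.pyGetD bits i 0] else acc) acc
    = acc ++ pairUp l := by
  induction l using pairUp.induct with
  | case1 a b rest ih =>
    intro n acc hdrop
    have hlen : 2 * n + 2 + rest.length = bits.length := by
      have := congrArg List.length hdrop
      simp [List.length_drop] at this
      omega
    have hget0 : bits[2 * n]? = some a := by
      have : (bits.drop (2 * n))[0]? = some a := by rw [hdrop]; rfl
      simpa [List.getElem?_drop] using this
    have hget1 : bits[2 * n + 1]? = some b := by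
      have : (bits.drop (2 * n))[1]? = some b := by rw [hdrop]; rfl
      simpa [List.getElem?_drop] using this
    rw [pyRange_pos_cons _ _ _ (by omega) (by omega)]
    rw [List.foldl_cons]
    have hga : PySem.List.pyGetD bits (2 * (n : Int)) 0 = a := by
      have : ((2 * n : Nat) : Int) = 2 * (n : Int) := by push_cast; ring
      rw [← this, PySem.List.pyGetD_natCast, List.getD_eq_getElem?_getD, hget0]
      rfl
    have hgb : PySem.List.pyGetD bits (2 * (n : Int) + 1) 0 = b := by
      have : ((2 * n + 1 : Nat) : Int) = 2 * (n : Int) + 1 := by push_cast; ring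
      rw [← this, PySem.List.pyGetD_natCast, List.getD_eq_getElem?_getD, hget1]
      rfl
    rw [hga, hgb]
    have hstep : (2 * (n : Int)) + 2 = 2 * ((n + 1 : Nat) : Int) := by push_cast; ring
    have hdrop2 : bits.drop (2 * (n + 1)) = rest := by
      have h2 := congrArg (List.drop 2) hdrop
      rw [List.drop_drop] at h2
      rw [show 2 * (n + 1) = 2 * n + 2 from by omega, h2]
      rfl
    rw [hstep, ih (n + 1) _ hdrop2]
    show _ = acc ++ ((if a ≠ b then [a] else []) ++ pairUp rest)
    split_ifs <;> simp
  | case2 l hne =>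
    intro n acc hdrop
    have hlist : l = [] ∨ ∃ x, l = [x] := by
      match l, hne with
      | [], _ => exact Or.inl rfl
      | [x], _ => exact Or.inr ⟨x, rfl⟩
      | a :: b :: rest, hne => exact absurd rfl (hne a b rest)
    have hlen : bits.length ≤ 2 * n + 1 := by
      have hl := congrArg List.length hdrop
      simp [List.length_drop] at hl
      rcases hlist with h | ⟨x, h⟩ <;> subst h <;> simp at hl <;> omega
    rw [pyRange_pos_nil _ _ _ (by omega) (by omega)]
    have hpu : pairUp l = [] := by
      rcases hlist with h | ⟨x, h⟩ <;> subst h <;> rfl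
    simp [hpu]

-- the streaming latch machine computes pairUp
lemma vn_run (l : List Int) :
    (∀ acc, (List.foldl vnFeedL (none, acc) l).2 = acc ++ pairUp l) ∧
    (∀ p acc, (List.foldl vnFeedL (some p, acc) l).2 = acc ++ pairUp (p :: l)) := by
  induction l with
  | nil => constructor <;> intros <;> simp [pairUp]
  | cons b rest ih =>
    constructor
    · intro acc
      rw [List.foldl_cons]
      show (List.foldl vnFeedL (some b, acc) rest).2 = _
      exact ih.2 b acc
    · intro p acc
      rw [List.foldl_cons]
      show (List.foldl vnFeedL (none, if p ≠ b then acc ++ [p] else acc) rest).2 = _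
      rw [ih.1]
      show _ = acc ++ ((if p ≠ b then [p] else []) ++ pairUp rest)
      split_ifs <;> simp

-- A's inner repack loop over indices equals a fold over the drop/take chunk
lemma chunk_fold (deb : List Int) :
    ∀ (n i' : Nat) (v0 : Int), i' + n ≤ deb.length →
    (PySem.List.pyRange 0 (n : Int) 1).foldl
      (fun val j => PySem.Int.bor (val <<< (1 : Nat)) (PySem.List.pyGetD deb ((i' : Int) + j) 0)) v0
    = ((deb.drop i').take n).foldl (fun val b => PySem.Int.bor (val <<< (1 : Nat)) b) v0 := by
  intro n
  induction n with
  | zero => intro i' v0 _; rw [PySem.List.pyRange_one_eq_nil (by omega)]; simp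
  | succ n ih =>
    intro i' v0 h
    have hcast : ((n + 1 : Nat) : Int) = (n : Int) + 1 := by push_cast; ring
    rw [hcast, PySem.List.pyRange_one_succ_right (by omega), List.foldl_append, ih i' v0 (by omega)]
    have hlt : i' + n < deb.length := by omega
    have hg : PySem.List.pyGetD deb ((i' : Int) + (n : Int)) 0 = deb[i' + n] := by
      have : ((i' + n : Nat) : Int) = (i' : Int) + (n : Int) := by push_cast; ring
      rw [← this, PySem.List.pyGetD_natCast, List.getD_eq_getElem?_getD,
        List.getElem?_eq_getElem hlt]
      rfl
    have htake : (deb.drop i').take (n + 1) = (deb.drop i').take n ++ [deb[i' + n]] := by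
      rw [List.take_add_one]
      congr 1
      rw [List.getElem?_drop, List.getElem?_eq_getElem hlt]
      rfl
    rw [htake, List.foldl_append]
    simp [hg]

-- ===== VERDICT (by name: the statement is the Claim_ definition above) =====
theorem von_neumann_debias_py_spec : Claim_equal_von_neumann_debias_py := by
  intro values bpv _hdom _hpre
  unfold Spec_von_neumann_debias_py von_neumann_debias_py von_neumann_debias_py_alt
  set r := PySem.List.pyRange (bpv - 1) (-1) (-1) with hr
  set bit : Int → Int → Int := fun v i => PySem.Int.band (v >>> i.toNat) 1 with hbit
  set flat := values.flatMap (fun v => r.map (bit v)) with hflat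
  -- A's bits array holds the flat bit stream
  set bitsA := values.foldl (fun bits v => r.foldl (fun bits i => bits.push (bit v i)) bits) #[]
    with hbitsA
  have hAtl : bitsA.toList = flat := by
    rw [hbitsA, foldl_abs Array.toList values _
      (fun L v => r.foldl (fun L i => L ++ [bit v i]) L)
      (fun s x _ => foldl_abs Array.toList r _ _
        (fun s' y _ => Array.toList_push) s) #[]]
    rw [PySem.List.foldl_congr_mem _ _ (fun bits v => bits ++ r.map (bit v)) _
      (fun acc x _ => PySem.List.foldl_append_singleton_eq_map (bit x) r acc)]
    rw [PySem.List.foldl_append_eq_flatMap]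
    exact hflat.symm
  have hszA : (bitsA.size : Int) = (flat.length : Int) := by
    rw [← hAtl, Array.length_toList]
  -- A's debiased array is pairUp flat
  set debA := (PySem.List.pyRange 0 ((bitsA.size : Int) - 1) 2).foldl
    (fun acc i => if aGet bitsA i ≠ aGet bitsA (i + 1) then acc.push (aGet bitsA i) else acc) #[]
    with hdebA
  have hdebAtl : debA.toList = pairUp flat := by
    rw [hdebA, foldl_abs Array.toList _ _
      (fun acc i =>
        if PySem.List.pyGetD flat i 0 ≠ PySem.List.pyGetD flat (i + 1) 0
        then acc ++ [PySem.List.pyGetD flat i 0] else acc) ?_ #[]]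
    · rw [hszA]
      simpa using pairs_loop flat flat 0 [] (by simp)
    · intro s i hi
      have hi0 : 0 ≤ i := by
        rw [PySem.List.mem_pyRange_iff_of_pos (by omega)] at hi
        exact hi.1
      simp only [aGet_toList _ _ hi0, aGet_toList _ _ (by omega : (0:Int) ≤ i + 1), hAtl]
      split_ifs <;> simp [Array.toList_push]
  -- B's streaming run computes pairUp flat
  set stB := values.foldl (fun st v => r.foldl (fun st i => vnFeed st (bit v i)) st)
    ((none : Option Int), (#[] : Array Int)) with hstB
  have hfeed : ∀ (s' : Option Int × Array Int) (b : Int),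
      (fun s : Option Int × Array Int => (s.1, s.2.toList)) (vnFeed s' b)
      = vnFeedL ((fun s : Option Int × Array Int => (s.1, s.2.toList)) s') b := by
    intro s' b
    rcases s' with ⟨o, arr⟩
    rcases o with _ | p
    · rfl
    · simp only [vnFeed, vnFeedL]
      split_ifs <;> simp [Array.toList_push]
  have hpt : ∀ (s : Option Int × Array Int) (v : Int), v ∈ values →
      (fun s : Option Int × Array Int => (s.1, s.2.toList))
        (r.foldl (fun st i => vnFeed st (bit v i)) s)
      = r.foldl (fun st i => vnFeedL st (bit v i))
        ((fun s : Option Int × Array Int => (s.1, s.2.toList)) s) := by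
    intro s v _
    exact foldl_abs (fun s : Option Int × Array Int => (s.1, s.2.toList)) r
      (fun st y => vnFeed st (bit v y)) (fun st y => vnFeedL st (bit v y))
      (fun s' y _ => hfeed s' (bit v y)) s
  have hphi : (fun s : Option Int × Array Int => (s.1, s.2.toList)) stB
      = List.foldl vnFeedL (none, []) flat := by
    rw [hstB]
    refine (foldl_abs (fun s : Option Int × Array Int => (s.1, s.2.toList)) values
      (fun st v => r.foldl (fun st i => vnFeed st (bit v i)) st)
      (fun st v => r.foldl (fun st i => vnFeedL st (bit v i)) st) hpt (none, #[])).trans ?_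
    show List.foldl (fun st v => r.foldl (fun st i => vnFeedL st (bit v i)) st) (none, []) values = _
    rw [hflat, List.foldl_flatMap]
    exact (PySem.List.foldl_congr_mem _ _ _ _
      (fun acc x _ => by rw [List.foldl_map])).symm
  have hdebBtl : stB.2.toList = pairUp flat := by
    have h2 : stB.2.toList = (List.foldl vnFeedL (none, []) flat).2 := congrArg Prod.snd hphi
    rw [h2]
    simpa using (vn_run flat).1 []
  have hszB : (stB.2.size : Int) = ((pairUp flat).length : Int) := by
    rw [← hdebBtl, Array.length_toList]
  have hszA2 : (debA.size : Int) = ((pairUp flat).length : Int) := by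
    rw [← hdebAtl, Array.length_toList]
  -- the repack loops agree (zeta-reduce the ports' lets, fold them back into the named terms)
  dsimp only
  rw [← hdebA, hszA2, hszB]
  set L := ((pairUp flat).length : Int) with hL
  rcases lt_trichotomy bpv 0 with hneg | hzero | hpos
  · -- bits_per_value < 0 : no bits, no debiased bits, empty repack range
    have hrnil : r = [] := PySem.List.pyRange_neg_one_eq_nil (by omega)
    have hfnil : flat = [] := by rw [hflat, hrnil]; simp
    have hLz : L = 0 := by rw [hL, hfnil]; rfl
    rw [hLz, pyRange_neg_nil _ _ _ hneg (by omega)]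
    rfl
  · exact absurd hzero _hpre
  · -- bits_per_value > 0 : the two array folds push equal values at every index of the range
    rw [foldl_abs Array.toList _ _
      (fun res i => res ++ [(PySem.List.pyRange 0 bpv 1).foldl
        (fun val j => PySem.Int.bor (val <<< (1 : Nat)) (aGet debA (i + j))) 0])
      (fun s x _ => Array.toList_push) #[],
      foldl_abs Array.toList _ _
      (fun res i => res ++ [(aSlice stB.2 i (i + bpv)).foldl
        (fun val b => PySem.Int.bor (val <<< (1 : Nat)) b) 0])
      (fun s x _ => Array.toList_push) #[]]
    apply PySem.List.foldl_congr_mem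
    intro acc i hi
    rw [PySem.List.mem_pyRange_iff_of_pos hpos] at hi
    obtain ⟨hi0, hiu, -⟩ := hi
    congr 1
    have hbound : i.toNat + bpv.toNat ≤ (pairUp flat).length := by omega
    -- left value: index fold = chunk fold
    have hleft : (PySem.List.pyRange 0 bpv 1).foldl
        (fun val j => PySem.Int.bor (val <<< (1 : Nat)) (aGet debA (i + j))) 0
        = (((pairUp flat).drop i.toNat).take bpv.toNat).foldl
          (fun val b => PySem.Int.bor (val <<< (1 : Nat)) b) 0 := by
      rw [PySem.List.foldl_congr_mem _ _
        (fun val j => PySem.Int.bor (val <<< (1 : Nat)) (PySem.List.pyGetD (pairUp flat) (i + j) 0)) _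
        (fun val j hj => by
          have hj0 : 0 ≤ j := (PySem.List.mem_pyRange_one.1 hj).1
          rw [aGet_toList _ _ (by omega), hdebAtl])]
      have hrw : (PySem.List.pyRange 0 bpv 1).foldl
          (fun val j => PySem.Int.bor (val <<< (1 : Nat)) (PySem.List.pyGetD (pairUp flat) (i + j) 0)) 0
          = (PySem.List.pyRange 0 ((bpv.toNat : Nat) : Int) 1).foldl
          (fun val j => PySem.Int.bor (val <<< (1 : Nat))
            (PySem.List.pyGetD (pairUp flat) (((i.toNat : Nat) : Int) + j) 0)) 0 := by
        rw [Int.toNat_of_nonneg hi0, Int.toNat_of_nonneg (le_of_lt hpos)]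
      rw [hrw, chunk_fold (pairUp flat) bpv.toNat i.toNat 0 hbound]
    -- right value: array slice fold = chunk fold
    have hright : (aSlice stB.2 i (i + bpv)).foldl
        (fun val b => PySem.Int.bor (val <<< (1 : Nat)) b) 0
        = (((pairUp flat).drop i.toNat).take bpv.toNat).foldl
          (fun val b => PySem.Int.bor (val <<< (1 : Nat)) b) 0 := by
      rw [← Array.foldl_toList]
      unfold aSlice
      rw [Array.toList_extract, hdebBtl, List.extract_eq_take_drop,
        show (i + bpv).toNat - i.toNat = bpv.toNat from by omega]
    rw [hleft, hright]
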